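-- pv_equiv track=rewrite | github.com/gatorbacon/wrestledata-simple | scripts/upcoming_ranked_matches.py | normalize_team_key
-- ===== SOURCE A (Python) =====
-- def normalize_team_key(name: str) -> str:
--     """
--     Normalize a team name for matching: lowercase, alphanumeric plus spaces,
--     collapse multiple spaces.
--     """
--     s = name.lower()
--     cleaned_chars = []
--     for ch in s:
--         if ch.isalnum() or ch.isspace():
--             cleaned_chars.append(ch)
--     cleaned = "".join(cleaned_chars)
--     return " ".join(cleaned.split())
-- ===== SOURCE B (Python) =====
-- def normalize_team_key(name: str) -> str:
--     parts = []
--     for word in name.split():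
--         filtered = ''.join(c for c in word.lower() if c.isalnum())
--         if filtered:
--             parts.append(filtered)
--     return ' '.join(parts)
-- ===== Notes on version B (the rewrite author's own statement) =====
-- stated objective: alternative
-- what changed: B tokenizes first with str.split() and then filters each word's characters (dropping words that filter to empty), instead of A's flat character filter over the whole string followed by split/join.
import Mathlib
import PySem

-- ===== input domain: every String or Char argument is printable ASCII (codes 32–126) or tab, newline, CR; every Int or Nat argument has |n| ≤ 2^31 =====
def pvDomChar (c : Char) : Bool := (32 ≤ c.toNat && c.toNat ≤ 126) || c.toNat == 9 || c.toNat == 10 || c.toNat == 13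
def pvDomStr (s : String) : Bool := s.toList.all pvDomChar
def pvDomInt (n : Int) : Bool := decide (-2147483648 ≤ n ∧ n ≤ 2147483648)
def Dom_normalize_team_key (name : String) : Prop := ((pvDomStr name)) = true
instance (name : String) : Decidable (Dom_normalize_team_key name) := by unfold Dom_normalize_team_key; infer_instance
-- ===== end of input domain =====

-- B tokenizes first (split, then per-word lowercase + filter, dropping words that filter to
-- empty) instead of A's flat character filter followed by split/join: an alternative
-- decomposition of the same task, same cost.

-- ===== PORT A =====
def normalize_team_key (name : String) : String :=
  let s := PySem.Str.lower name
  let cleaned_chars := s.toList.foldl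
    (fun acc ch => if PySem.Chars.isalnum ch || PySem.Chars.isspace ch then acc ++ [ch] else acc) []
  let cleaned := String.ofList cleaned_chars
  PySem.Str.join " " (PySem.Str.split₀ cleaned)

-- ===== PORT B =====
def normalize_team_key_alt (name : String) : String :=
  let parts := (PySem.Str.split₀ name).foldl
    (fun parts word =>
      let filtered := String.ofList ((PySem.Str.lower word).toList.filter PySem.Chars.isalnum)
      if filtered ≠ "" then parts ++ [filtered] else parts) []
  PySem.Str.join " " parts

-- ===== PRECONDITION & SPEC =====
def Spec_normalize_team_key (name : String) (out : String) : Prop := out = normalize_team_key_alt name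
instance (name : String) (out : String) : Decidable (Spec_normalize_team_key name out) := by unfold Spec_normalize_team_key; infer_instance

-- ===== CLAIM (what is proved, stated in full; the proofs are below) =====
def Claim_equal_normalize_team_key : Prop := ∀ (name : String), Dom_normalize_team_key name → Spec_normalize_team_key name (normalize_team_key name)

-- ===== LEMMAS AND PROOFS =====

theorem charLe_iff (a c : Char) : (a ≤ c) ↔ a.toNat ≤ c.toNat := by
  rw [Char.le_def, UInt32.le_iff_toNat_le]; rfl
theorem isupper_iff (c : Char) : PySem.Chars.isupper c = true ↔ 65 ≤ c.toNat ∧ c.toNat ≤ 90 := by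
  simp only [PySem.Chars.isupper, Bool.and_eq_true, decide_eq_true_eq, charLe_iff, show 'A'.toNat = 65 from rfl, show 'Z'.toNat = 90 from rfl, show 'a'.toNat = 97 from rfl, show 'z'.toNat = 122 from rfl, show '0'.toNat = 48 from rfl, show '9'.toNat = 57 from rfl]
theorem islower_iff (c : Char) : PySem.Chars.islower c = true ↔ 97 ≤ c.toNat ∧ c.toNat ≤ 122 := by
  simp only [PySem.Chars.islower, Bool.and_eq_true, decide_eq_true_eq, charLe_iff, show 'A'.toNat = 65 from rfl, show 'Z'.toNat = 90 from rfl, show 'a'.toNat = 97 from rfl, show 'z'.toNat = 122 from rfl, show '0'.toNat = 48 from rfl, show '9'.toNat = 57 from rfl]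
theorem isdigit_iff (c : Char) : PySem.Chars.isdigit c = true ↔ 48 ≤ c.toNat ∧ c.toNat ≤ 57 := by
  simp only [PySem.Chars.isdigit, Bool.and_eq_true, decide_eq_true_eq, charLe_iff, show 'A'.toNat = 65 from rfl, show 'Z'.toNat = 90 from rfl, show 'a'.toNat = 97 from rfl, show 'z'.toNat = 122 from rfl, show '0'.toNat = 48 from rfl, show '9'.toNat = 57 from rfl]
theorem isalnum_iff (c : Char) : PySem.Chars.isalnum c = true ↔
    (65 ≤ c.toNat ∧ c.toNat ≤ 90) ∨ (97 ≤ c.toNat ∧ c.toNat ≤ 122) ∨ (48 ≤ c.toNat ∧ c.toNat ≤ 57) := by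
  simp only [PySem.Chars.isalnum, PySem.Chars.isalpha, Bool.or_eq_true, isupper_iff, islower_iff, isdigit_iff]
  tauto
theorem isspace_iff (c : Char) : PySem.Chars.isspace c = true ↔
    (c.toNat = 32 ∨ (9 ≤ c.toNat ∧ c.toNat ≤ 13) ∨ (28 ≤ c.toNat ∧ c.toNat ≤ 31) ∨ c.toNat = 133 ∨
     c.toNat = 160 ∨ c.toNat = 5760 ∨ (8192 ≤ c.toNat ∧ c.toNat ≤ 8202) ∨ c.toNat = 8232 ∨
     c.toNat = 8233 ∨ c.toNat = 8239 ∨ c.toNat = 8287 ∨ c.toNat = 12288) := by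
  simp only [PySem.Chars.isspace, Bool.or_eq_true, Bool.and_eq_true, decide_eq_true_eq]
  tauto
theorem low_isspace (c : Char) : PySem.Chars.isspace (PySem.Chars.lowerChar c) = PySem.Chars.isspace c := by
  unfold PySem.Chars.lowerChar
  by_cases h : PySem.Chars.isupper c = true
  · rw [if_pos h]
    rw [isupper_iff] at h
    have hv : (Char.ofNat (c.toNat + 32)).toNat = c.toNat + 32 := by
      rw [Char.toNat_ofNat, if_pos (Or.inl (by omega))]
    have l1 : PySem.Chars.isspace (Char.ofNat (c.toNat + 32)) = false := by
      rw [Bool.eq_false_iff]; intro hs; rw [isspace_iff, hv] at hs; omega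
    have l2 : PySem.Chars.isspace c = false := by
      rw [Bool.eq_false_iff]; intro hs; rw [isspace_iff] at hs; omega
    rw [l1, l2]
  · rw [if_neg h]
theorem alnum_not_space (c : Char) (h : PySem.Chars.isalnum c = true) : PySem.Chars.isspace c = false := by
  rw [isalnum_iff] at h
  rw [Bool.eq_false_iff]; intro hs; rw [isspace_iff] at hs; omega
theorem go_low (s : List Char) : ∀ (cur : List Char) (acc : List (List Char)),
    PySem.Chars.split₀.go (s.map PySem.Chars.lowerChar) (cur.map PySem.Chars.lowerChar)
      (acc.map (List.map PySem.Chars.lowerChar))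
      = (PySem.Chars.split₀.go s cur acc).map (List.map PySem.Chars.lowerChar) := by
  induction s with
  | nil =>
    intro cur acc
    by_cases h : cur.isEmpty <;> simp [PySem.Chars.split₀.go, h]
  | cons c rest ih =>
    intro cur acc
    by_cases hs : PySem.Chars.isspace c = true
    · by_cases hc : cur.isEmpty
      · simp [PySem.Chars.split₀.go, low_isspace, hs, hc]
        simpa using ih [] acc
      · simp only [List.map_cons, PySem.Chars.split₀.go, low_isspace, hs, if_true,
          List.isEmpty_map, hc, if_neg]
        have := ih [] (cur.reverse :: acc)
        simp only [List.map_cons, List.map_reverse, List.map_nil] at this ⊢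
        simpa [hc] using this
    · simp only [List.map_cons, PySem.Chars.split₀.go, low_isspace, hs, if_neg, if_false]
      have := ih (c :: cur) acc
      simpa using this
theorem go_filter (s : List Char) : ∀ (cur : List Char) (acc : List (List Char)),
    PySem.Chars.split₀.go
      (s.filter (fun c => PySem.Chars.isalnum c || PySem.Chars.isspace c))
      (cur.filter PySem.Chars.isalnum)
      ((acc.map (List.filter PySem.Chars.isalnum)).filter (· ≠ []))
      = ((PySem.Chars.split₀.go s cur acc).map (List.filter PySem.Chars.isalnum)).filter (· ≠ []) := by
  induction s with
  | nil =>
    intro cur acc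
    by_cases h : cur.isEmpty
    · have : cur = [] := List.isEmpty_iff.mp h
      subst this
      simp [PySem.Chars.split₀.go]
    · have hcur : cur ≠ [] := by simpa [List.isEmpty_eq_false_iff] using h
      by_cases hf : (cur.filter PySem.Chars.isalnum).isEmpty
      · have hfe : cur.filter PySem.Chars.isalnum = [] := List.isEmpty_iff.mp hf
        simp [PySem.Chars.split₀.go, h, hf, List.filter_reverse, List.map_reverse, hfe]
      · have hfe : cur.filter PySem.Chars.isalnum ≠ [] := by
          simpa [List.isEmpty_eq_false_iff] using hf
        simp [PySem.Chars.split₀.go, h, hf, List.filter_reverse, List.map_reverse, hfe]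
  | cons c rest ih =>
    intro cur acc
    by_cases hs : PySem.Chars.isspace c = true
    · have hna : PySem.Chars.isalnum c = false := by
        by_contra h
        have := alnum_not_space c (by simpa using h)
        rw [this] at hs; exact Bool.false_ne_true hs
      by_cases hc : cur.isEmpty
      · have : cur = [] := List.isEmpty_iff.mp hc
        subst this
        simpa [PySem.Chars.split₀.go, hs, hna] using ih [] acc
      · have h2 := ih [] (cur.reverse :: acc)
        simp only [List.map_cons, List.filter_cons, List.filter_reverse, List.filter_nil] at h2
        simp only [PySem.Chars.split₀.go, List.filter_cons, hs, hna, Bool.false_eq_true,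
          Bool.or_true, if_true, if_false]
        rw [if_neg hc]
        by_cases hf : List.filter PySem.Chars.isalnum cur = []
        · rw [if_pos (by simp [hf])]
          simpa [hf] using h2
        · rw [if_neg (by simp [List.isEmpty_iff, hf])]
          simpa [hf] using h2
    · by_cases ha : PySem.Chars.isalnum c = true
      · simpa [PySem.Chars.split₀.go, hs, ha, List.filter_cons] using ih (c :: cur) acc
      · simpa [PySem.Chars.split₀.go, hs, ha, List.filter_cons] using ih (c :: cur) acc
theorem core (cs : List Char) :
    PySem.Chars.split₀ ((PySem.Chars.lower cs).filter (fun c => PySem.Chars.isalnum c || PySem.Chars.isspace c))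
      = ((PySem.Chars.split₀ cs).map (fun w => (PySem.Chars.lower w).filter PySem.Chars.isalnum)).filter (· ≠ []) := by
  unfold PySem.Chars.split₀ PySem.Chars.lower
  have h1 := go_filter (cs.map PySem.Chars.lowerChar) [] []
  simp only [List.filter_nil, List.map_nil] at h1
  have h2 := go_low cs [] []
  simp only [List.map_nil] at h2
  rw [h1, h2, List.map_map]
  rfl
theorem bridge (ws : List String) :
    ((ws.map (fun w => (PySem.Chars.lower w.toList).filter PySem.Chars.isalnum)).filter (· ≠ []))
      = List.map String.toList
        ((ws.filter (fun w => String.ofList ((PySem.Str.lower w).toList.filter PySem.Chars.isalnum) ≠ "")).map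
          (fun w => String.ofList ((PySem.Str.lower w).toList.filter PySem.Chars.isalnum))) := by
  induction ws with
  | nil => simp
  | cons w ws ih =>
    have ht : (String.ofList ((PySem.Str.lower w).toList.filter PySem.Chars.isalnum)).toList
        = (PySem.Chars.lower w.toList).filter PySem.Chars.isalnum := by
      rw [String.toList_ofList, PySem.Str.toList_lower]
    by_cases he : (PySem.Chars.lower w.toList).filter PySem.Chars.isalnum = []
    · have he' : String.ofList ((PySem.Str.lower w).toList.filter PySem.Chars.isalnum) = "" := by
        rw [← String.toList_eq_nil_iff, ht]; exact he
      simp only [List.map_cons, List.filter_cons, he, he']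
      simpa [he, he'] using ih
    · have he' : String.ofList ((PySem.Str.lower w).toList.filter PySem.Chars.isalnum) ≠ "" := by
        intro e
        exact he (by rw [← ht, e]; rfl)
      simp only [List.map_cons, List.filter_cons]
      rw [if_pos (by simpa using he), if_pos (by simpa using he')]
      simp only [List.map_cons, ht]
      rw [ih]

theorem final (name : String) : normalize_team_key name = normalize_team_key_alt name := by
  unfold normalize_team_key normalize_team_key_alt
  rw [← String.toList_inj]
  have hA : ∀ (l : List Char), l.foldl
      (fun acc ch => if PySem.Chars.isalnum ch || PySem.Chars.isspace ch then acc ++ [ch] else acc) []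
      = l.filter (fun ch => PySem.Chars.isalnum ch || PySem.Chars.isspace ch) := by
    intro l
    simpa using PySem.List.foldl_append_if
      (p := fun ch => PySem.Chars.isalnum ch || PySem.Chars.isspace ch) (f := fun c => c) l []
  have hB : (PySem.Str.split₀ name).foldl
      (fun parts word =>
        let filtered := String.ofList ((PySem.Str.lower word).toList.filter PySem.Chars.isalnum)
        if filtered ≠ "" then parts ++ [filtered] else parts) []
      = ((PySem.Str.split₀ name).filter
          (fun word => String.ofList ((PySem.Str.lower word).toList.filter PySem.Chars.isalnum) ≠ "")).map
          (fun word => String.ofList ((PySem.Str.lower word).toList.filter PySem.Chars.isalnum)) := by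
    simpa using PySem.List.foldl_append_if
      (p := fun word => decide (String.ofList ((PySem.Str.lower word).toList.filter PySem.Chars.isalnum) ≠ ""))
      (f := fun word => String.ofList ((PySem.Str.lower word).toList.filter PySem.Chars.isalnum))
      (PySem.Str.split₀ name) []
  show (PySem.Str.join " " (PySem.Str.split₀ (String.ofList ((PySem.Str.lower name).toList.foldl
      (fun acc ch => if PySem.Chars.isalnum ch || PySem.Chars.isspace ch then acc ++ [ch] else acc) [])))).toList
    = (PySem.Str.join " " ((PySem.Str.split₀ name).foldl
      (fun parts word =>
        let filtered := String.ofList ((PySem.Str.lower word).toList.filter PySem.Chars.isalnum)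
        if filtered ≠ "" then parts ++ [filtered] else parts) [])).toList
  rw [hA, hB]
  rw [PySem.Str.toList_join, PySem.Str.toList_join]
  refine congrArg (PySem.Chars.join " ".toList) ?_
  rw [PySem.Str.split₀_map_toList, String.toList_ofList, PySem.Str.toList_lower, core,
    ← PySem.Str.split₀_map_toList name, List.map_map]
  exact bridge (PySem.Str.split₀ name)

-- ===== VERDICT (by name: the statement is the Claim_ definition above) =====
theorem normalize_team_key_spec : Claim_equal_normalize_team_key := by
  intro name _
  unfold Spec_normalize_team_key
  exact final name
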